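-- pv_equiv track=rewrite | github.com/angelorushan/progetto_finder_avtecno | app.py | prepara_dettagli_profilo
-- ===== SOURCE A (Python) =====
-- def prepara_dettagli_profilo(profilo):
--     """Prepara tutti i dettagli del profilo per la visualizzazione"""
--     dettagli = {}
--
--     # Lista dei campi che vogliamo mostrare (escludendo 'Codice' che è già mostrato)
--     campi_da_mostrare = [
--     'Codice', 'Dimensioni', 'Dissipazione Max', 'Larghezza Max Strip',
--     'Materiale/Finitura', 'Cover', 'Tappi', 'Ganci'
--     ]
--     for campo in campi_da_mostrare:
--         valore = profilo.get(campo, '')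
--         if valore and str(valore).strip() and str(valore).strip().lower() not in ['', 'n/a', 'na', '-']:
--             dettagli[campo] = str(valore).strip()
--
--     # Aggiungi tutti gli altri campi che potrebbero esistere nel foglio
--     for chiave, valore in profilo.items():
--         if (chiave not in campi_da_mostrare and
--             chiave != 'Codice' and
--             valore and
--             str(valore).strip() and
--             str(valore).strip().lower() not in ['', 'n/a', 'na', '-']):
--             dettagli[chiave] = str(valore).strip()
--
--     return dettagli
-- ===== SOURCE B (Python) =====
-- def prepara_dettagli_profilo(profilo):
--     """Prepara tutti i dettagli del profilo per la visualizzazione"""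
--     campi_da_mostrare = [
--         'Codice', 'Dimensioni', 'Dissipazione Max', 'Larghezza Max Strip',
--         'Materiale/Finitura', 'Cover', 'Tappi', 'Ganci'
--     ]
--     # One pass over the profile: partition valid entries into the fixed-field
--     # table and the ordered extras list, then assemble fixed fields in display
--     # order followed by the extras.
--     fixed = {}
--     extras = []
--     for chiave, valore in profilo.items():
--         s = str(valore).strip()
--         if valore and s and s.lower() not in ('', 'n/a', 'na', '-'):
--             if chiave in campi_da_mostrare:
--                 fixed[chiave] = s
--             else:
--                 extras.append((chiave, s))
--     dettagli = {c: fixed[c] for c in campi_da_mostrare if c in fixed}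
--     dettagli.update(extras)
--     return dettagli
-- ===== Notes on version B (the rewrite author's own statement) =====
-- stated objective: alternative
-- what changed: Replaces A's two filter-insert loops (one over the fixed field list doing a dict lookup per field, then one over all profile items) by a single partitioning pass over the profile that routes each valid entry into a fixed-field table or an extras list, followed by an assembly step that reads the table in display order and appends the extras.
import Mathlib
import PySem

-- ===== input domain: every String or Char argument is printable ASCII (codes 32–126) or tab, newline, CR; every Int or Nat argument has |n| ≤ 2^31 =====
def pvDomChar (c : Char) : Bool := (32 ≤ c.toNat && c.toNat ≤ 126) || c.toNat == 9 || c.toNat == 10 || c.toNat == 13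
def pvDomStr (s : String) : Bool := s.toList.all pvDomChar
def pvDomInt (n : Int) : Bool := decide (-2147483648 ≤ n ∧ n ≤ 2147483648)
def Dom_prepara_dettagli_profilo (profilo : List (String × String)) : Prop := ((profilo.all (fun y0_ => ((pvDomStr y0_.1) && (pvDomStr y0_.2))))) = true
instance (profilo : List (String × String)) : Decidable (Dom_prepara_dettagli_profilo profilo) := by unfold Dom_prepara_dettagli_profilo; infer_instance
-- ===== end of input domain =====

-- B replaces A's two filter-insert loops by a single partitioning pass over the profile
-- (fixed-field table + ordered extras list) followed by an assembly step (objective: alternative).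
-- ===== PORT A =====
def pvCampi : List String :=
  ["Codice", "Dimensioni", "Dissipazione Max", "Larghezza Max Strip",
   "Materiale/Finitura", "Cover", "Tappi", "Ganci"]

def prepara_dettagli_profilo (profilo : List (String × String)) : List (String × String) :=
  let d := PySem.Dict.ofList profilo
  let dettagli : PySem.Dict String String :=
    pvCampi.foldl (fun acc campo =>
      let valore := d.getD campo ""
      if valore ≠ "" ∧ PySem.Str.strip valore ≠ "" ∧
         PySem.Str.lower (PySem.Str.strip valore) ∉ ["", "n/a", "na", "-"] then
        acc.insert campo (PySem.Str.strip valore)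
      else acc) PySem.Dict.empty
  let dettagli :=
    d.items.foldl (fun acc p =>
      if p.1 ∉ pvCampi ∧ p.1 ≠ "Codice" ∧ p.2 ≠ "" ∧ PySem.Str.strip p.2 ≠ "" ∧
         PySem.Str.lower (PySem.Str.strip p.2) ∉ ["", "n/a", "na", "-"] then
        acc.insert p.1 (PySem.Str.strip p.2)
      else acc) dettagli
  dettagli.items

-- ===== PORT B =====
def prepara_dettagli_profilo_alt (profilo : List (String × String)) : List (String × String) :=
  let d := PySem.Dict.ofList profilo
  -- one pass: partition the valid entries into (fixed-field table, extras list)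
  let st := d.items.foldl
    (fun (st : PySem.Dict String String × List (String × String)) p =>
      let s := PySem.Str.strip p.2
      if p.2 ≠ "" ∧ s ≠ "" ∧ PySem.Str.lower s ∉ ["", "n/a", "na", "-"] then
        if p.1 ∈ pvCampi then (st.1.insert p.1 s, st.2)
        else (st.1, st.2 ++ [(p.1, s)])
      else st)
    (PySem.Dict.empty, [])
  -- assembly: fixed fields in display order, then the extras
  let dettagli : PySem.Dict String String :=
    pvCampi.foldl (fun acc c =>
      if (st.1.get? c).isSome then acc.insert c ((st.1.get? c).getD "") else acc)
      PySem.Dict.empty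
  (st.2.foldl (fun acc p => acc.insert p.1 p.2) dettagli).items

-- ===== PRECONDITION & SPEC =====
def Spec_prepara_dettagli_profilo (profilo : List (String × String)) (out : List (String × String)) : Prop := out = prepara_dettagli_profilo_alt profilo
instance (profilo : List (String × String)) (out : List (String × String)) : Decidable (Spec_prepara_dettagli_profilo profilo out) := by unfold Spec_prepara_dettagli_profilo; infer_instance

-- ===== CLAIM (what is proved, stated in full; the proofs are below) =====
def Claim_equal_prepara_dettagli_profilo : Prop := ∀ (profilo : List (String × String)), Dom_prepara_dettagli_profilo profilo → Spec_prepara_dettagli_profilo profilo (prepara_dettagli_profilo profilo)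

-- ===== LEMMAS AND PROOFS =====

-- The validity condition both programs test, as a Boolean.
def pvValido (v : String) : Bool :=
  (v != "") && (PySem.Str.strip v != "") &&
  !(["", "n/a", "na", "-"].contains (PySem.Str.lower (PySem.Str.strip v)))

lemma pvValido_iff (v : String) :
    (pvValido v = true) ↔
      (v ≠ "" ∧ PySem.Str.strip v ≠ "" ∧
       PySem.Str.lower (PySem.Str.strip v) ∉ ["", "n/a", "na", "-"]) := by
  simp [pvValido, List.contains_eq_mem]
  exact ⟨fun h => ⟨h.1.1, h.1.2, h.2⟩, fun h => ⟨⟨h.1, h.2.1⟩, h.2.2⟩⟩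

-- A conditional-insert loop over pairwise-distinct keys all fresh for acc appends its hits.
lemma foldl_insert_if_fresh {α : Type} (key : α → String) (val : α → String)
    (C : α → Prop) [DecidablePred C] :
    ∀ (l : List α) (acc : PySem.Dict String String),
      (l.map key).Nodup → (∀ a ∈ l, C a → acc.contains (key a) = false) →
      (l.foldl (fun a x => if C x then a.insert (key x) (val x) else a) acc).items
        = acc.items ++ l.filterMap (fun x => if C x then some (key x, val x) else none) := by
  intro l
  induction l with
  | nil => intro acc _ _; simp
  | cons x l ih =>
    intro acc hnd hfresh
    simp only [List.map_cons, List.nodup_cons] at hnd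
    by_cases hC : C x
    · have hfx : acc.contains (key x) = false := hfresh x (by simp) hC
      have hfresh' : ∀ a ∈ l, C a → (acc.insert (key x) (val x)).contains (key a) = false := by
        intro a ha hCa
        rw [PySem.Dict.contains_insert]
        have : key a ≠ key x := by
          intro h; exact hnd.1 (h ▸ List.mem_map_of_mem ha)
        simp [this, hfresh a (List.mem_cons_of_mem _ ha) hCa]
      simp only [List.foldl_cons, if_pos hC]
      rw [ih _ hnd.2 hfresh', PySem.Dict.items_insert_of_not_contains _ _ hfx]
      simp [hC]
    · simp only [List.foldl_cons, if_neg hC]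
      rw [ih _ hnd.2 (fun a ha hCa => hfresh a (List.mem_cons_of_mem _ ha) hCa)]
      simp [hC]

-- A guarded filterMap is a filter followed by a map.
lemma filterMap_if_eq_map_filter {α β : Type} (P : α → Prop) [DecidablePred P] (F : α → β) :
    ∀ l : List α,
      l.filterMap (fun x => if P x then some (F x) else none)
        = (l.filter (fun x => decide (P x))).map F := by
  intro l
  induction l with
  | nil => simp
  | cons x l ih => by_cases h : P x <;> simp [h, ih]

-- On items of a Nodup-keyed dict, the pair's value is the dict lookup.
lemma items_filterMap_eq (d : PySem.Dict String String) (hnd : d.keys.Nodup) :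
    ∀ (l : List (String × String)), (∀ p ∈ l, p ∈ d.items) →
      l.filterMap (fun p =>
        if p.1 ∉ pvCampi ∧ p.1 ≠ "Codice" ∧ p.2 ≠ "" ∧ PySem.Str.strip p.2 ≠ "" ∧
           PySem.Str.lower (PySem.Str.strip p.2) ∉ ["", "n/a", "na", "-"] then
          some (p.1, PySem.Str.strip p.2)
        else none)
      = ((l.map Prod.fst).filter (fun k => !(pvCampi.contains k) && (k != "Codice"))).filterMap
          (fun k => if pvValido (d.getD k "") then some (k, PySem.Str.strip (d.getD k "")) else none) := by
  intro l
  induction l with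
  | nil => intro _; simp
  | cons p l ih =>
    intro hmem
    have hp : p ∈ d.items := hmem p (by simp)
    obtain ⟨k, v⟩ := p
    have hget : d.getD k "" = v := PySem.Dict.getD_of_mem_items d hp hnd ""
    have ih' := ih (fun q hq => hmem q (List.mem_cons_of_mem _ hq))
    by_cases h1 : k ∈ pvCampi
    · rw [List.filterMap_cons_none (by
          simp only [if_neg (show ¬ ((k, v).1 ∉ pvCampi ∧ (k, v).1 ≠ "Codice" ∧ (k, v).2 ≠ "" ∧
            PySem.Str.strip (k, v).2 ≠ "" ∧
            PySem.Str.lower (PySem.Str.strip (k, v).2) ∉ ["", "n/a", "na", "-"]) from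
            fun h => h.1 h1)]),
        List.map_cons,
        List.filter_cons_of_neg (p := fun k => !pvCampi.contains k && k != "Codice")
          (a := (k, v).1) (by simp [List.contains_eq_mem, h1])]
      exact ih'
    · by_cases h2 : k = "Codice"
      · exact absurd (h2 ▸ h1) (by simp [pvCampi])
      · have hpos : (!pvCampi.contains k && (k != "Codice")) = true := by
          simp [List.contains_eq_mem, h1, h2]
        by_cases h3 : pvValido v = true
        · have h3' := (pvValido_iff v).mp h3
          rw [List.filterMap_cons_some (b := (k, PySem.Str.strip v)) (by
              simp only [if_pos (show ((k, v).1 ∉ pvCampi ∧ (k, v).1 ≠ "Codice" ∧ (k, v).2 ≠ "" ∧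
                PySem.Str.strip (k, v).2 ≠ "" ∧
                PySem.Str.lower (PySem.Str.strip (k, v).2) ∉ ["", "n/a", "na", "-"]) from
                ⟨h1, h2, h3'⟩)]),
            List.map_cons,
            List.filter_cons_of_pos (p := fun k => !pvCampi.contains k && k != "Codice")
              (a := (k, v).1) hpos,
            List.filterMap_cons_some (b := (k, PySem.Str.strip v)) (by
              simp only [hget, if_pos h3]),
            ih']
        · rw [List.filterMap_cons_none (by
              simp only [if_neg (show ¬ ((k, v).1 ∉ pvCampi ∧ (k, v).1 ≠ "Codice" ∧ (k, v).2 ≠ "" ∧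
                PySem.Str.strip (k, v).2 ≠ "" ∧
                PySem.Str.lower (PySem.Str.strip (k, v).2) ∉ ["", "n/a", "na", "-"]) from
                fun h => h3 ((pvValido_iff v).mpr ⟨h.2.2.1, h.2.2.2.1, h.2.2.2.2⟩))]),
            List.map_cons,
            List.filter_cons_of_pos (p := fun k => !pvCampi.contains k && k != "Codice")
              (a := (k, v).1) hpos,
            List.filterMap_cons_none (by simp only [hget]; simp [h3]),
            ih']

-- A's whole computation, stated over an arbitrary Nodup-keyed dict d: the normal form N.
lemma pv_main (d : PySem.Dict String String) (hnd : d.keys.Nodup) :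
    (List.foldl (fun acc p =>
        if p.1 ∉ pvCampi ∧ p.1 ≠ "Codice" ∧ p.2 ≠ "" ∧ PySem.Str.strip p.2 ≠ "" ∧
           PySem.Str.lower (PySem.Str.strip p.2) ∉ ["", "n/a", "na", "-"] then
          acc.insert p.1 (PySem.Str.strip p.2)
        else acc)
      (List.foldl (fun acc campo =>
        if d.getD campo "" ≠ "" ∧ PySem.Str.strip (d.getD campo "") ≠ "" ∧
           PySem.Str.lower (PySem.Str.strip (d.getD campo "")) ∉ ["", "n/a", "na", "-"] then
          acc.insert campo (PySem.Str.strip (d.getD campo ""))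
        else acc) PySem.Dict.empty pvCampi)
      d.items).items
    = (pvCampi ++ d.keys.filter (fun k => !(pvCampi.contains k) && (k != "Codice"))).filterMap
        (fun k => if pvValido (d.getD k "") then some (k, PySem.Str.strip (d.getD k "")) else none) := by
  have hkeys : d.keys = d.items.map Prod.fst := by simp only [PySem.Dict.keys]
  have h1 := foldl_insert_if_fresh (fun c => c)
      (fun c => PySem.Str.strip (d.getD c ""))
      (fun c => d.getD c "" ≠ "" ∧ PySem.Str.strip (d.getD c "") ≠ "" ∧
        PySem.Str.lower (PySem.Str.strip (d.getD c "")) ∉ ["", "n/a", "na", "-"])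
      pvCampi PySem.Dict.empty
      (by simp [pvCampi])
      (by intro a _ _; simp [PySem.Dict.contains_empty])
  have hA1keys : (List.foldl (fun acc campo =>
      if d.getD campo "" ≠ "" ∧ PySem.Str.strip (d.getD campo "") ≠ "" ∧
         PySem.Str.lower (PySem.Str.strip (d.getD campo "")) ∉ ["", "n/a", "na", "-"] then
        acc.insert campo (PySem.Str.strip (d.getD campo ""))
      else acc) PySem.Dict.empty pvCampi).keys
      = (pvCampi.filterMap (fun c =>
          if d.getD c "" ≠ "" ∧ PySem.Str.strip (d.getD c "") ≠ "" ∧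
             PySem.Str.lower (PySem.Str.strip (d.getD c "")) ∉ ["", "n/a", "na", "-"] then
            some (c, PySem.Str.strip (d.getD c ""))
          else none)).map Prod.fst := by
    simp only [PySem.Dict.keys]; rw [h1]; rfl
  have h2 := foldl_insert_if_fresh (Prod.fst (α := String) (β := String))
      (fun p => PySem.Str.strip p.2)
      (fun p => p.1 ∉ pvCampi ∧ p.1 ≠ "Codice" ∧ p.2 ≠ "" ∧ PySem.Str.strip p.2 ≠ "" ∧
        PySem.Str.lower (PySem.Str.strip p.2) ∉ ["", "n/a", "na", "-"])
      d.items _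
      (by rw [← hkeys]; exact hnd)
      (by
        intro p _ hCp
        rw [PySem.Dict.contains_eq_decide_mem_keys, hA1keys]
        simp only [decide_eq_false_iff_not, List.mem_map]
        rintro ⟨q, hq, hq1⟩
        obtain ⟨c, hc, hce⟩ := List.mem_filterMap.mp hq
        split at hce
        · cases hce; exact hCp.1 (hq1 ▸ hc)
        · simp at hce)
  have hemp : (PySem.Dict.empty : PySem.Dict String String).items = [] := rfl
  rw [h2, h1, hemp, List.nil_append, List.filterMap_append]
  have hcong : ∀ c : String,
      (if d.getD c "" ≠ "" ∧ PySem.Str.strip (d.getD c "") ≠ "" ∧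
          PySem.Str.lower (PySem.Str.strip (d.getD c "")) ∉ ["", "n/a", "na", "-"] then
        some (c, PySem.Str.strip (d.getD c ""))
      else none)
      = (if pvValido (d.getD c "") then some (c, PySem.Str.strip (d.getD c "")) else none) := by
    intro c
    by_cases h : pvValido (d.getD c "") = true
    · rw [if_pos h, if_pos ((pvValido_iff _).mp h)]
    · rw [if_neg h, if_neg (fun hh => h ((pvValido_iff _).mpr hh))]
  rw [items_filterMap_eq d hnd d.items (fun _ hp => hp), ← hkeys]
  simp only [hcong]

-- B's partitioning fold splits into its two independent components (general step shape).
lemma pv_fold_split_gen (C : String × String → Prop) [DecidablePred C]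
    (val : String × String → String) :
    ∀ (l : List (String × String)) (a : PySem.Dict String String) (b : List (String × String)),
      l.foldl (fun (st : PySem.Dict String String × List (String × String)) p =>
          if C p then
            if p.1 ∈ pvCampi then (st.1.insert p.1 (val p), st.2)
            else (st.1, st.2 ++ [(p.1, val p)])
          else st) (a, b)
        = (l.foldl (fun ac p => if C p ∧ p.1 ∈ pvCampi then ac.insert p.1 (val p) else ac) a,
           b ++ l.filterMap (fun p =>
              if C p ∧ p.1 ∉ pvCampi then some (p.1, val p) else none)) := by
  intro l
  induction l with
  | nil => intro a b; simp
  | cons p l ih =>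
    intro a b
    simp only [List.foldl_cons, List.filterMap_cons]
    by_cases hv : C p
    · by_cases hm : p.1 ∈ pvCampi
      · rw [if_pos hv, if_pos hm, if_pos (show C p ∧ p.1 ∈ pvCampi from ⟨hv, hm⟩),
          if_neg (show ¬(C p ∧ p.1 ∉ pvCampi) from fun h => h.2 hm), ih]
      · rw [if_pos hv, if_neg hm, if_neg (show ¬(C p ∧ p.1 ∈ pvCampi) from fun h => hm h.2),
          if_pos (show C p ∧ p.1 ∉ pvCampi from ⟨hv, hm⟩), ih]
        simp
    · rw [if_neg hv, if_neg (show ¬(C p ∧ p.1 ∈ pvCampi) from fun h => hv h.1),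
        if_neg (show ¬(C p ∧ p.1 ∉ pvCampi) from fun h => hv h.1), ih]

-- Lookup in the fixed-field table equals the validity-filtered profile lookup (for fixed fields).
lemma pv_fixed_get (d : PySem.Dict String String) (hnd : d.keys.Nodup)
    (F : PySem.Dict String String)
    (hF : F.items = d.items.filterMap (fun p =>
        if (p.2 ≠ "" ∧ PySem.Str.strip p.2 ≠ "" ∧
            PySem.Str.lower (PySem.Str.strip p.2) ∉ ["", "n/a", "na", "-"]) ∧ p.1 ∈ pvCampi then
          some (p.1, PySem.Str.strip p.2)
        else none))
    (c : String) (hc : c ∈ pvCampi) :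
    (if (F.get? c).isSome then some (c, (F.get? c).getD "") else none)
      = (if pvValido (d.getD c "") then some (c, PySem.Str.strip (d.getD c "")) else none) := by
  have hkeys : d.keys = d.items.map Prod.fst := by simp only [PySem.Dict.keys]
  have hFkeys : F.keys
      = (d.items.filter (fun p => decide ((p.2 ≠ "" ∧ PySem.Str.strip p.2 ≠ "" ∧
          PySem.Str.lower (PySem.Str.strip p.2) ∉ ["", "n/a", "na", "-"]) ∧ p.1 ∈ pvCampi))).map
          Prod.fst := by
    simp only [PySem.Dict.keys, hF,
      filterMap_if_eq_map_filter (fun p : String × String =>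
        (p.2 ≠ "" ∧ PySem.Str.strip p.2 ≠ "" ∧
         PySem.Str.lower (PySem.Str.strip p.2) ∉ ["", "n/a", "na", "-"]) ∧ p.1 ∈ pvCampi)
        (fun p => (p.1, PySem.Str.strip p.2)), List.map_map]
    rfl
  have hFnd : F.keys.Nodup := by
    rw [hFkeys]
    exact List.Nodup.sublist (List.Sublist.map Prod.fst List.filter_sublist) (hkeys ▸ hnd)
  have hmemFkeys : ∀ x ∈ F.keys, ∃ w, (x, w) ∈ d.items ∧
      (w ≠ "" ∧ PySem.Str.strip w ≠ "" ∧
       PySem.Str.lower (PySem.Str.strip w) ∉ ["", "n/a", "na", "-"]) := by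
    intro x hx
    rw [hFkeys] at hx
    obtain ⟨q, hq, hq1⟩ := List.mem_map.mp hx
    have hqprop := List.of_mem_filter hq
    simp only [decide_eq_true_eq] at hqprop
    exact ⟨q.2, by rw [← hq1]; exact List.mem_of_mem_filter hq, hqprop.1⟩
  cases hget : d.get? c with
  | some v =>
    have hin : (c, v) ∈ d.items := PySem.Dict.mem_items_of_get?_eq_some d hget
    have hgd : d.getD c "" = v := by rw [PySem.Dict.getD_eq_get?_getD, hget]; rfl
    by_cases hval : pvValido v = true
    · have hC := (pvValido_iff v).mp hval
      have hmemF : (c, PySem.Str.strip v) ∈ F.items := by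
        rw [hF]
        exact List.mem_filterMap.mpr ⟨(c, v), hin, by rw [if_pos ⟨hC, hc⟩]⟩
      have hFg : F.get? c = some (PySem.Str.strip v) :=
        PySem.Dict.get?_of_mem_items F hmemF hFnd
      rw [hFg, hgd, if_pos hval]
      rfl
    · have hFg : F.get? c = none := by
        rw [PySem.Dict.get?_eq_none_iff_not_mem_keys]
        intro hx
        obtain ⟨w, hw, hwv⟩ := hmemFkeys c hx
        have : d.get? c = some w := PySem.Dict.get?_of_mem_items d hw hnd
        rw [hget] at this
        exact hval ((pvValido_iff v).mpr (Option.some.inj this ▸ hwv))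
      rw [hFg, hgd, if_neg (fun h => hval h)]
      rfl
  | none =>
    have hgd : d.getD c "" = "" := by rw [PySem.Dict.getD_eq_get?_getD, hget]; rfl
    have hFg : F.get? c = none := by
      rw [PySem.Dict.get?_eq_none_iff_not_mem_keys]
      intro hx
      obtain ⟨w, hw, _⟩ := hmemFkeys c hx
      have := PySem.Dict.get?_of_mem_items d hw hnd
      simp [hget] at this
    rw [hFg, hgd, if_neg (by decide)]
    rfl

-- B's whole computation over an arbitrary Nodup-keyed dict d equals the same normal form N.
lemma pv_alt_main (d : PySem.Dict String String) (hnd : d.keys.Nodup) :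
    (((d.items.foldl (fun (st : PySem.Dict String String × List (String × String)) p =>
          if p.2 ≠ "" ∧ PySem.Str.strip p.2 ≠ "" ∧
             PySem.Str.lower (PySem.Str.strip p.2) ∉ ["", "n/a", "na", "-"] then
            if p.1 ∈ pvCampi then (st.1.insert p.1 (PySem.Str.strip p.2), st.2)
            else (st.1, st.2 ++ [(p.1, PySem.Str.strip p.2)])
          else st) (PySem.Dict.empty, [])).2.foldl
        (fun acc p => acc.insert p.1 p.2)
        (pvCampi.foldl (fun acc c =>
          if ((d.items.foldl (fun (st : PySem.Dict String String × List (String × String)) p =>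
              if p.2 ≠ "" ∧ PySem.Str.strip p.2 ≠ "" ∧
                 PySem.Str.lower (PySem.Str.strip p.2) ∉ ["", "n/a", "na", "-"] then
                if p.1 ∈ pvCampi then (st.1.insert p.1 (PySem.Str.strip p.2), st.2)
                else (st.1, st.2 ++ [(p.1, PySem.Str.strip p.2)])
              else st) (PySem.Dict.empty, [])).1.get? c).isSome then
            acc.insert c (((d.items.foldl (fun (st : PySem.Dict String String × List (String × String)) p =>
              if p.2 ≠ "" ∧ PySem.Str.strip p.2 ≠ "" ∧
                 PySem.Str.lower (PySem.Str.strip p.2) ∉ ["", "n/a", "na", "-"] then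
                if p.1 ∈ pvCampi then (st.1.insert p.1 (PySem.Str.strip p.2), st.2)
                else (st.1, st.2 ++ [(p.1, PySem.Str.strip p.2)])
              else st) (PySem.Dict.empty, [])).1.get? c).getD "")
          else acc) PySem.Dict.empty)).items)
    = (pvCampi ++ d.keys.filter (fun k => !(pvCampi.contains k) && (k != "Codice"))).filterMap
        (fun k => if pvValido (d.getD k "") then some (k, PySem.Str.strip (d.getD k "")) else none) := by
  have hkeys : d.keys = d.items.map Prod.fst := by simp only [PySem.Dict.keys]
  have hsplit := pv_fold_split_gen
      (fun p : String × String => p.2 ≠ "" ∧ PySem.Str.strip p.2 ≠ "" ∧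
        PySem.Str.lower (PySem.Str.strip p.2) ∉ ["", "n/a", "na", "-"])
      (fun p => PySem.Str.strip p.2) d.items PySem.Dict.empty []
  simp only [hsplit, List.nil_append]
  -- the fixed-field table F and the extras list E
  set F : PySem.Dict String String := d.items.foldl (fun ac p =>
      if (p.2 ≠ "" ∧ PySem.Str.strip p.2 ≠ "" ∧
          PySem.Str.lower (PySem.Str.strip p.2) ∉ ["", "n/a", "na", "-"]) ∧ p.1 ∈ pvCampi then
        ac.insert p.1 (PySem.Str.strip p.2)
      else ac) PySem.Dict.empty with hFdef
  set E : List (String × String) := d.items.filterMap (fun p =>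
      if (p.2 ≠ "" ∧ PySem.Str.strip p.2 ≠ "" ∧
          PySem.Str.lower (PySem.Str.strip p.2) ∉ ["", "n/a", "na", "-"]) ∧ p.1 ∉ pvCampi then
        some (p.1, PySem.Str.strip p.2)
      else none) with hEdef
  have hFitems : F.items = d.items.filterMap (fun p =>
      if (p.2 ≠ "" ∧ PySem.Str.strip p.2 ≠ "" ∧
          PySem.Str.lower (PySem.Str.strip p.2) ∉ ["", "n/a", "na", "-"]) ∧ p.1 ∈ pvCampi then
        some (p.1, PySem.Str.strip p.2)
      else none) := by
    rw [hFdef, foldl_insert_if_fresh Prod.fst (fun p => PySem.Str.strip p.2) _ d.items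
      PySem.Dict.empty (hkeys ▸ hnd) (by intro a _ _; simp [PySem.Dict.contains_empty])]
    rfl
  set dettagli : PySem.Dict String String := pvCampi.foldl (fun acc c =>
      if (F.get? c).isSome then acc.insert c ((F.get? c).getD "") else acc)
      PySem.Dict.empty with hDdef
  have hdet : dettagli.items = pvCampi.filterMap (fun c =>
      if pvValido (d.getD c "") then some (c, PySem.Str.strip (d.getD c "")) else none) := by
    rw [hDdef, foldl_insert_if_fresh (fun c => c) (fun c => (F.get? c).getD "")
      (fun c => (F.get? c).isSome = true) pvCampi PySem.Dict.empty (by simp [pvCampi])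
      (by intro a _ _; simp [PySem.Dict.contains_empty])]
    have hemp : (PySem.Dict.empty : PySem.Dict String String).items = [] := rfl
    rw [hemp, List.nil_append]
    exact List.filterMap_congr (fun c hc => pv_fixed_get d hnd F hFitems c hc)
  have hdetkeys : ∀ x ∈ dettagli.keys, x ∈ pvCampi := by
    intro x hx
    rw [PySem.Dict.keys, hdet] at hx
    obtain ⟨q, hq, hq1⟩ := List.mem_map.mp hx
    obtain ⟨c, hc, hce⟩ := List.mem_filterMap.mp hq
    split at hce
    · cases hce; exact hq1 ▸ hc
    · simp at hce
  have hEfst : ∀ p ∈ E, p.1 ∉ pvCampi := by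
    intro p hp
    rw [hEdef] at hp
    obtain ⟨q, _, hqe⟩ := List.mem_filterMap.mp hp
    split at hqe
    · rename_i hcond; cases hqe; exact hcond.2
    · simp at hqe
  have hEnd : (E.map Prod.fst).Nodup := by
    rw [hEdef, filterMap_if_eq_map_filter (fun p : String × String =>
        (p.2 ≠ "" ∧ PySem.Str.strip p.2 ≠ "" ∧
         PySem.Str.lower (PySem.Str.strip p.2) ∉ ["", "n/a", "na", "-"]) ∧ p.1 ∉ pvCampi)
        (fun p => (p.1, PySem.Str.strip p.2)), List.map_map]
    exact List.Nodup.sublist (List.Sublist.map _ List.filter_sublist) (hkeys ▸ hnd)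
  rw [PySem.Dict.items_foldl_insert_fresh E Prod.fst Prod.snd dettagli
      (by
        intro p hp
        rw [PySem.Dict.contains_eq_decide_mem_keys]
        simp only [decide_eq_false_iff_not]
        exact fun h => hEfst p hp (hdetkeys _ h)) hEnd,
    hdet]
  have hE2 : E.map (fun p => (p.1, p.2)) = E := by simp
  rw [hE2, hEdef]
  have hcongE : ∀ p : String × String,
      (if (p.2 ≠ "" ∧ PySem.Str.strip p.2 ≠ "" ∧
          PySem.Str.lower (PySem.Str.strip p.2) ∉ ["", "n/a", "na", "-"]) ∧ p.1 ∉ pvCampi then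
        some (p.1, PySem.Str.strip p.2)
      else none)
      = (if p.1 ∉ pvCampi ∧ p.1 ≠ "Codice" ∧ p.2 ≠ "" ∧ PySem.Str.strip p.2 ≠ "" ∧
          PySem.Str.lower (PySem.Str.strip p.2) ∉ ["", "n/a", "na", "-"] then
        some (p.1, PySem.Str.strip p.2)
      else none) := by
    intro p
    by_cases hm : p.1 ∈ pvCampi
    · rw [if_neg (fun h => h.2 hm), if_neg (fun h => h.1 hm)]
    · have hcod : p.1 ≠ "Codice" := fun h => hm (by rw [h]; simp [pvCampi])
      by_cases hv : p.2 ≠ "" ∧ PySem.Str.strip p.2 ≠ "" ∧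
          PySem.Str.lower (PySem.Str.strip p.2) ∉ ["", "n/a", "na", "-"]
      · rw [if_pos ⟨hv, hm⟩, if_pos ⟨hm, hcod, hv⟩]
      · rw [if_neg (fun h => hv h.1), if_neg (fun h => hv h.2.2)]
  rw [List.filterMap_congr (fun p _ => hcongE p),
    items_filterMap_eq d hnd d.items (fun _ hp => hp), ← hkeys, List.filterMap_append]

-- ===== VERDICT (by name: the statement is the Claim_ definition above) =====
theorem prepara_dettagli_profilo_spec : Claim_equal_prepara_dettagli_profilo := by
  intro profilo _
  show prepara_dettagli_profilo profilo = prepara_dettagli_profilo_alt profilo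
  unfold prepara_dettagli_profilo prepara_dettagli_profilo_alt
  exact (pv_main (PySem.Dict.ofList profilo) (PySem.Dict.nodup_keys_ofList profilo)).trans
    (pv_alt_main (PySem.Dict.ofList profilo) (PySem.Dict.nodup_keys_ofList profilo)).symm
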